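-- pv_equiv track=rewrite | github.com/14472506/multi_task_pipeline | utils/loop_utils.py | multi_task_training_scheduler
-- ===== SOURCE A (Python) =====
-- def multi_task_training_scheduler(max_list, min_list):
--     """
--     something
--     """
--     if len(min_list) == 0:
--         return(max_list)
--     else:
--         even = int(len(max_list)/len(min_list))
--         rem = len(max_list)%len(min_list)
--         iters = len(max_list) - rem
--         new_max = []
--         min_count = 0
--         for i in range(iters):
--             if i%even == 0:
--                 new_max.append(min_list[min_count])
--                 min_count += 1
--             new_max.append(max_list[i])
--         if rem == 0:
--             new_min = []
--         else:
--             new_min = max_list[-rem:]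
--         return multi_task_training_scheduler(new_max, new_min)
-- ===== SOURCE B (Python) =====
-- def multi_task_training_scheduler(max_list, min_list):
--     while min_list:
--         n, m = len(max_list), len(min_list)
--         even, rem = n // m, n % m
--         new_max = []
--         if even:
--             for k in range(m):
--                 new_max.append(min_list[k])
--                 new_max.extend(max_list[k * even:(k + 1) * even])
--         tail = max_list[n - rem:] if rem else []
--         max_list, min_list = new_max, tail
--     return max_list
-- ===== Notes on version B (the rewrite author's own statement) =====
-- stated objective: alternative
-- what changed: Replaces the tail recursion by an explicit while loop and builds each round's interleaving by chunk slices (one min element followed by its slice of max_list) instead of A's per-index modulo test with a running min_count.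
import Mathlib
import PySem

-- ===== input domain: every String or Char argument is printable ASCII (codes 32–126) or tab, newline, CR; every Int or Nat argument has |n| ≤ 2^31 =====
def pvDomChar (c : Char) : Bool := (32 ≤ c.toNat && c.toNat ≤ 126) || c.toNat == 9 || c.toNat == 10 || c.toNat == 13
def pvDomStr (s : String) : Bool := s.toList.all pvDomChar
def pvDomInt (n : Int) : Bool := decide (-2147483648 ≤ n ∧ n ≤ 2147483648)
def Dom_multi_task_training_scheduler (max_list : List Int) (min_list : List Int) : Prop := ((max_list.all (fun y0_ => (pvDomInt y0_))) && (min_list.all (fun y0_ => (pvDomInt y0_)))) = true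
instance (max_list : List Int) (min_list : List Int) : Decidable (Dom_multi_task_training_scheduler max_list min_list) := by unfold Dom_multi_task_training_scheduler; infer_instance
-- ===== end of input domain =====

-- B rewrites A's recursion as an iterative loop whose rounds build the interleaving by
-- chunk slices instead of a modulo test per index (objective: alternative decomposition).
-- A is total on list inputs (the i%even==0 test is only reached when even > 0), so no Pre_.

-- ===== PORT A =====
-- one loop iteration of A's for-loop: optionally append min_list[min_count], then append max_list[i]
-- (indices are provably in range on every call A makes, so getD transcribes the subscripts exactly)
def pvStepA (max_list min_list : List Int) (even : Nat) : List Int × Nat → Nat → List Int × Nat :=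
  fun st i =>
    let st := if i % even = 0 then (st.1 ++ [min_list.getD st.2 0], st.2 + 1) else st
    (st.1 ++ [max_list.getD i 0], st.2)

-- 'int(len/len)' and '%' on the (nonnegative) lengths are Nat division/mod;
-- 'max_list[-rem:]' with rem > 0 is 'drop (length - rem)' (PySem.List.slice_from_neg_natCast)
def multi_task_training_scheduler (max_list : List Int) (min_list : List Int) : List Int :=
  if _hne : min_list.length = 0 then max_list
  else
    let even := max_list.length / min_list.length
    let rem := max_list.length % min_list.length
    let iters := max_list.length - rem
    let new_max := ((List.range iters).foldl (pvStepA max_list min_list even) ([], 0)).1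
    let new_min := if rem = 0 then ([] : List Int) else max_list.drop (max_list.length - rem)
    multi_task_training_scheduler new_max new_min
termination_by min_list.length
decreasing_by
  split
  · simp only [List.length_nil]; omega
  · have := Nat.mod_lt max_list.length (y := min_list.length) (by omega)
    simp only [List.length_drop]
    omega

-- ===== PORT B =====
def multi_task_training_scheduler_alt (max_list : List Int) (min_list : List Int) : List Int :=
  if _hne : min_list = [] then max_list
  else
    let n := max_list.length
    let m := min_list.length
    let even := n / m
    let rem := n % m
    let new_max :=
      if even = 0 then ([] : List Int)
      else (List.range m).foldl
        (fun nm k => nm ++ min_list.getD k 0 :: (max_list.drop (k * even)).take even) []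
    let tail := if rem = 0 then ([] : List Int) else max_list.drop (n - rem)
    multi_task_training_scheduler_alt new_max tail
termination_by min_list.length
decreasing_by
  have hm : 0 < min_list.length := List.length_pos_iff.mpr _hne
  split
  · simp only [List.length_nil]; omega
  · have := Nat.mod_lt max_list.length (y := min_list.length) (by omega)
    simp only [List.length_drop]
    omega

-- ===== PRECONDITION & SPEC =====
def Spec_multi_task_training_scheduler (max_list : List Int) (min_list : List Int) (out : List Int) : Prop := out = multi_task_training_scheduler_alt max_list min_list
instance (max_list : List Int) (min_list : List Int) (out : List Int) : Decidable (Spec_multi_task_training_scheduler max_list min_list out) := by unfold Spec_multi_task_training_scheduler; infer_instance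

-- ===== CLAIM (what is proved, stated in full; the proofs are below) =====
def Claim_equal_multi_task_training_scheduler : Prop := ∀ (max_list : List Int) (min_list : List Int), Dom_multi_task_training_scheduler max_list min_list → Spec_multi_task_training_scheduler max_list min_list (multi_task_training_scheduler max_list min_list)

-- ===== LEMMAS AND PROOFS =====

-- folding A's step over a block of indices none of which is divisible by `even`
-- appends exactly the corresponding segment of max_list and leaves min_count alone
lemma pvSegA (max_list min_list : List Int) (even : Nat) :
    ∀ (len s : Nat) (acc : List Int) (c : Nat),
      (∀ j < len, (s + j) % even ≠ 0) → s + len ≤ max_list.length →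
      ((List.range len).map (fun j => s + j)).foldl (pvStepA max_list min_list even) (acc, c)
        = (acc ++ (max_list.drop s).take len, c) := by
  intro len
  induction len with
  | zero => intro s acc c _ _; simp
  | succ l ih =>
    intro s acc c hnd hle
    rw [List.range_succ, List.map_append, List.foldl_append]
    rw [ih s acc c (fun j hj => hnd j (by omega)) (by omega)]
    simp only [List.map_cons, List.map_nil, List.foldl_cons, List.foldl_nil, pvStepA]
    rw [if_neg (hnd l (by omega))]
    have hidx : s + l < max_list.length := by omega
    have : (max_list.drop s).take (l + 1) = (max_list.drop s).take l ++ [max_list.getD (s + l) 0] := by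
      rw [List.take_add_one]
      congr 1
      rw [List.getElem?_drop]
      rw [List.getElem?_eq_getElem hidx, List.getD_eq_getElem _ _ hidx]
      rfl
    simp [this]

-- one full chunk: index even*c triggers the min-append, the following even-1 indices do not
lemma pvChunkA (max_list min_list : List Int) (even : Nat) (heven : 0 < even) :
    ∀ (c : Nat) (acc : List Int),
      even * (c + 1) ≤ max_list.length →
      ((List.range even).map (fun j => even * c + j)).foldl (pvStepA max_list min_list even) (acc, c)
        = (acc ++ min_list.getD c 0 :: (max_list.drop (even * c)).take even, c + 1) := by
  intro c acc hle
  obtain ⟨e, rfl⟩ : ∃ e, even = e + 1 := ⟨even - 1, by omega⟩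
  rw [List.range_succ_eq_map]
  simp only [List.map_cons, List.foldl_cons, List.map_map]
  have h0 : pvStepA max_list min_list (e + 1) (acc, c) ((e + 1) * c + 0) =
      (acc ++ [min_list.getD c 0, max_list.getD ((e + 1) * c) 0], c + 1) := by
    simp [pvStepA, Nat.mul_mod_right]
  rw [h0]
  have hmap : ((List.range e).map (Nat.succ) |>.map (fun j => (e + 1) * c + j))
      = (List.range e).map (fun j => ((e + 1) * c + 1) + j) := by
    rw [List.map_map]; apply List.map_congr_left; intro j _; simp [Nat.succ_eq_add_one]; omega
  rw [show ((fun j => (e + 1) * c + j) ∘ Nat.succ) = (fun j => ((e + 1) * c + 1) + j) by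
    funext j; simp [Function.comp, Nat.succ_eq_add_one]; omega]
  rw [pvSegA max_list min_list (e + 1) e ((e + 1) * c + 1)
      (acc ++ [min_list.getD c 0, max_list.getD ((e + 1) * c) 0]) (c + 1)
      (by
        intro j hj
        have h1 : ((e + 1) * c + 1 + j) % (e + 1) = (1 + j) % (e + 1) := by
          have hx : (e + 1) * c + 1 + j = (1 + j) + (e + 1) * c := by ring
          rw [hx, Nat.add_mul_mod_self_left]
        rw [h1, Nat.mod_eq_of_lt (by omega)]
        omega)
      (by
        have hx : (e + 1) * (c + 1) = (e + 1) * c + (e + 1) := by ring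
        omega)]
  have hidx : (e + 1) * c < max_list.length := by nlinarith
  have htake : (max_list.drop ((e + 1) * c)).take (e + 1)
      = max_list.getD ((e + 1) * c) 0 :: (max_list.drop ((e + 1) * c + 1)).take e := by
    have hd : max_list.drop ((e + 1) * c) = max_list[(e + 1) * c] :: max_list.drop ((e + 1) * c + 1) :=
      List.drop_eq_getElem_cons hidx
    rw [hd, List.take_succ_cons, List.getD_eq_getElem _ _ hidx]
  simp [htake]

-- A's fold over range(even*m) equals B's chunked fold (with final min_count m)
lemma pvInner (max_list min_list : List Int) (even : Nat) (heven : 0 < even) :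
    ∀ (m : Nat), even * m ≤ max_list.length →
      (List.range (even * m)).foldl (pvStepA max_list min_list even) ([], 0)
        = ((List.range m).foldl
            (fun nm k => nm ++ min_list.getD k 0 :: (max_list.drop (k * even)).take even) [], m) := by
  intro m
  induction m with
  | zero => simp
  | succ m ih =>
    intro hle
    have hmul : even * (m + 1) = even * m + even := by ring
    have hsplit : List.range (even * (m + 1)) =
        List.range (even * m) ++ (List.range even).map (fun j => even * m + j) := by
      rw [hmul, List.range_add]
    rw [hsplit, List.foldl_append, ih (by omega)]
    rw [pvChunkA max_list min_list even heven m _ (by omega)]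
    rw [List.range_succ, List.foldl_append]
    simp [Nat.mul_comm]

-- main equality, by strong induction on the length of min_list (the recursion measure)
lemma pvMain : ∀ (k : Nat) (max_list min_list : List Int), min_list.length ≤ k →
    multi_task_training_scheduler max_list min_list
      = multi_task_training_scheduler_alt max_list min_list := by
  intro k
  induction k with
  | zero =>
    intro max_list min_list hk
    have : min_list = [] := List.length_eq_zero_iff.mp (by omega)
    subst this
    unfold multi_task_training_scheduler multi_task_training_scheduler_alt
    simp
  | succ k ih =>
    intro max_list min_list hk
    by_cases hnil : min_list = []
    · subst hnil
      unfold multi_task_training_scheduler multi_task_training_scheduler_alt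
      simp
    · have hm : 0 < min_list.length := List.length_pos_iff.mpr hnil
      unfold multi_task_training_scheduler multi_task_training_scheduler_alt
      rw [dif_neg (by omega), dif_neg hnil]
      dsimp only
      have hrem : max_list.length % min_list.length < min_list.length := Nat.mod_lt _ hm
      have hdm := Nat.div_add_mod max_list.length min_list.length
      have hnewmax :
          ((List.range (max_list.length - max_list.length % min_list.length)).foldl
              (pvStepA max_list min_list (max_list.length / min_list.length)) ([], 0)).1
            = (if max_list.length / min_list.length = 0 then ([] : List Int)
               else (List.range min_list.length).foldl
                 (fun nm k => nm ++ min_list.getD k 0 ::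
                   (max_list.drop (k * (max_list.length / min_list.length))).take
                     (max_list.length / min_list.length)) []) := by
        by_cases he : max_list.length / min_list.length = 0
        · rw [if_pos he]
          rw [he] at hdm
          have : max_list.length - max_list.length % min_list.length = 0 := by omega
          simp [this]
        · rw [if_neg he]
          have hiters : max_list.length - max_list.length % min_list.length
              = (max_list.length / min_list.length) * min_list.length := by
            have hc : min_list.length * (max_list.length / min_list.length)
                = (max_list.length / min_list.length) * min_list.length := Nat.mul_comm _ _
            omega
          rw [hiters,
            pvInner max_list min_list (max_list.length / min_list.length)
              (Nat.pos_of_ne_zero he) min_list.length (by rw [← hiters]; omega)]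
      rw [hnewmax]
      apply ih
      split
      · simp
      · simp only [List.length_drop]
        omega

-- ===== VERDICT (by name: the statement is the Claim_ definition above) =====
theorem multi_task_training_scheduler_spec : Claim_equal_multi_task_training_scheduler := by
  intro max_list min_list _
  exact pvMain min_list.length max_list min_list le_rfl
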